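-- pv_equiv track=rewrite | github.com/sai003/Event-Management-System-9900-main | services/events-service/python-flask-server/swagger_server/controllers/recommendations_controller.py | create_event_ranking
-- ===== SOURCE A (Python) =====
-- def create_event_ranking(booked_events, preferences, event_details, max_limit):
--     """Creates a List of Event IDs, ranked by importance
--
--     :rtype: List
--     """
--     # result dict stores the scores for each Event
--     result_dict = {}
--     for event in event_details:
--         result_dict[event[0]] = 0
--
--     # Get the categories for previously booked Events
--     user_categories = list(set([e[1] for e in event_details if e[0] in booked_events]))
--     # find other Events with Matching Categories
--     matching_categories = list(filter(lambda event: event[1] in user_categories, event_details))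
--     # Give a point to each Event that matches the categories from User Bookings
--     for c in matching_categories:
--         tmp = result_dict[c[0]] + 1
--         result_dict[c[0]] = tmp
--
--     # Give a point to each Event that matches the users Tag preferences
--     for p in preferences:
--         for e in event_details:
--             if p in e[2]:
--                 tmp = result_dict[e[0]] + 1
--                 result_dict[e[0]] = tmp
--
--     # filter out prevous bookings
--     resultList = list(filter(lambda event: event[0] not in booked_events, result_dict.items()))
--     # sort the List
--     resultList.sort(key = lambda x: x[1], reverse=True)
--     if (max_limit):
--         return resultList[:int(max_limit)]
--     else:
--         return resultList
-- ===== SOURCE B (Python) =====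
-- def create_event_ranking(booked_events, preferences, event_details, max_limit):
--     """Creates a List of Event IDs, ranked by importance
--
--     :rtype: List
--     """
--     booked = set(booked_events)
--     # categories of previously booked events
--     user_categories = {e[1] for e in event_details if e[0] in booked}
--     # multiplicity of each preferred tag
--     pref_count = {}
--     for p in preferences:
--         pref_count[p] = pref_count.get(p, 0) + 1
--     # one pass over the events: category point + tag points, accumulated per id
--     scores = {}
--     for ev_id, category, tags in event_details:
--         pts = (1 if category in user_categories else 0) \
--             + sum(pref_count.get(t, 0) for t in set(tags))
--         scores[ev_id] = scores.get(ev_id, 0) + pts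
--     result = [(i, s) for i, s in scores.items() if i not in booked]
--     result.sort(key=lambda x: x[1], reverse=True)
--     return result[:int(max_limit)] if max_limit else result
-- ===== Notes on version B (the rewrite author's own statement) =====
-- stated objective: faster
-- what changed: Replaces A's per-preference scan over all events and list-membership tests by a booked-id set, a preference-multiplicity dict and one accumulation pass over the events, scoring each event directly.
import Mathlib
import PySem

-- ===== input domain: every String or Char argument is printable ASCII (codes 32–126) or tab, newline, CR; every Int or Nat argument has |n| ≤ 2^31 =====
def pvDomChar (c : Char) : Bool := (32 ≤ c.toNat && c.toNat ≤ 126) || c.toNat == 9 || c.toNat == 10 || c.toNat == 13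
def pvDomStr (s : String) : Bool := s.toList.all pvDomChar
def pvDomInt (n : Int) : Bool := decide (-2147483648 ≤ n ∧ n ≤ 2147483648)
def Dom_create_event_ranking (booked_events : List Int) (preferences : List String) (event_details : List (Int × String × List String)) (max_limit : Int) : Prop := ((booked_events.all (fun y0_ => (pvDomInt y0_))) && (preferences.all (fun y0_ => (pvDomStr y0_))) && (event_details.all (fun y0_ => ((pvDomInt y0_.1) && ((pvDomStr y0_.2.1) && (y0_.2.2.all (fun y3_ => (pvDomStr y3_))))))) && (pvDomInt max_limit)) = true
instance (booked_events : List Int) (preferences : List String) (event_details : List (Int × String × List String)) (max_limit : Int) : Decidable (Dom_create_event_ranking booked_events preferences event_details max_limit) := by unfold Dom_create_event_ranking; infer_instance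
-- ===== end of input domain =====

-- B replaces A's per-preference scan over all events and its list-membership tests by a booked-id
-- set, a preference-multiplicity dict and a single accumulation pass over the events (objective: faster).

-- ===== PORT A =====
def create_event_ranking (booked_events : List Int) (preferences : List String) (event_details : List (Int × String × List String)) (max_limit : Int) : List (Int × Int) :=
  -- result_dict[event[0]] = 0 for every event
  let result_dict : PySem.Dict Int Int :=
    event_details.foldl (fun d event => d.insert event.1 0) PySem.Dict.empty
  -- user_categories = list(set([...])): consumed only through membership, so the set's order is irrelevant
  let user_categories : PySem.Set String :=
    PySem.Set.ofList ((event_details.filter (fun e => booked_events.contains e.1)).map (fun e => e.2.1))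
  let matching_categories :=
    event_details.filter (fun event => user_categories.contains event.2.1)
  -- result_dict[c[0]] + 1: the key is always present (phase 1 inserted every event id), so getD 0 is exact
  let result_dict :=
    matching_categories.foldl (fun d c => d.insert c.1 (d.getD c.1 0 + 1)) result_dict
  let result_dict :=
    preferences.foldl (fun d p =>
      event_details.foldl (fun d e =>
        if e.2.2.contains p then d.insert e.1 (d.getD e.1 0 + 1) else d) d) result_dict
  let resultList := result_dict.items.filter (fun event => !(booked_events.contains event.1))
  let resultList := PySem.List.sorted resultList (fun x => x.2) true
  -- if (max_limit): return resultList[:int(max_limit)]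
  if max_limit ≠ 0 then PySem.List.slice resultList none (some max_limit) else resultList

-- ===== PORT B =====
def create_event_ranking_alt (booked_events : List Int) (preferences : List String) (event_details : List (Int × String × List String)) (max_limit : Int) : List (Int × Int) :=
  let booked : PySem.Set Int := PySem.Set.ofList booked_events
  let user_categories : PySem.Set String :=
    PySem.Set.ofList ((event_details.filter (fun e => booked.contains e.1)).map (fun e => e.2.1))
  let pref_count : PySem.Dict String Int :=
    preferences.foldl (fun d p => d.insert p (d.getD p 0 + 1)) PySem.Dict.empty
  -- sum over set(tags): a sum of ints, independent of the set's iteration order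
  let scores : PySem.Dict Int Int :=
    event_details.foldl (fun d e =>
      let pts := (if user_categories.contains e.2.1 then (1 : Int) else 0)
        + ((PySem.Set.ofList e.2.2).map (fun t => pref_count.getD t 0)).sum
      d.insert e.1 (d.getD e.1 0 + pts)) PySem.Dict.empty
  let result := scores.items.filter (fun p => !(booked.contains p.1))
  let result := PySem.List.sorted result (fun x => x.2) true
  if max_limit ≠ 0 then PySem.List.slice result none (some max_limit) else result

-- ===== PRECONDITION & SPEC =====
def Spec_create_event_ranking (booked_events : List Int) (preferences : List String) (event_details : List (Int × String × List String)) (max_limit : Int) (out : List (Int × Int)) : Prop := out = create_event_ranking_alt booked_events preferences event_details max_limit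
instance (booked_events : List Int) (preferences : List String) (event_details : List (Int × String × List String)) (max_limit : Int) (out : List (Int × Int)) : Decidable (Spec_create_event_ranking booked_events preferences event_details max_limit out) := by unfold Spec_create_event_ranking; infer_instance

-- ===== CLAIM (what is proved, stated in full; the proofs are below) =====
def Claim_equal_create_event_ranking : Prop := ∀ (booked_events : List Int) (preferences : List String) (event_details : List (Int × String × List String)) (max_limit : Int), Dom_create_event_ranking booked_events preferences event_details max_limit → Spec_create_event_ranking booked_events preferences event_details max_limit (create_event_ranking booked_events preferences event_details max_limit)

-- ===== LEMMAS AND PROOFS =====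

-- set(xs) and xs test membership alike
theorem pv_ofList_contains {α : Type} [BEq α] [LawfulBEq α] (l : List α) (x : α) :
    (PySem.Set.ofList l).contains x = l.contains x := by
  simp [PySem.Set.contains_eq_listContains]

-- s.update(xs) is s when xs brings nothing new
theorem pv_set_update_self {α : Type} [BEq α] [LawfulBEq α] (s : PySem.Set α) (xs : List α)
    (h : ∀ x ∈ xs, x ∈ s) : PySem.Set.update s xs = s := by
  rw [PySem.Set.update_eq_append_filter]
  have hnil : (PySem.Set.ofList xs).filter (fun y => !(PySem.Set.contains s y)) = [] := by
    rw [List.filter_eq_nil_iff]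
    intro a ha
    have : a ∈ xs := (PySem.Set.mem_ofList _ _).1 ha
    simp [PySem.Set.contains_eq_listContains, h a this]
  rw [hnil, List.append_nil]

-- value of an accumulate-per-id fold
theorem pv_getD_accum (l : List (Int × String × List String))
    (f : (Int × String × List String) → Int) (d : PySem.Dict Int Int) (k : Int) :
    (l.foldl (fun d e => d.insert e.1 (d.getD e.1 0 + f e)) d).getD k 0
      = d.getD k 0 + ((l.filter (fun e => e.1 == k)).map f).sum := by
  induction l generalizing d with
  | nil => simp
  | cons e t ih =>
    simp only [List.foldl_cons, ih, List.filter_cons]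
    by_cases h : e.1 = k
    · simp [h]; ring
    · simp [h, PySem.Dict.getD_insert, Ne.symm h]

theorem pv_getD_init (l : List (Int × String × List String)) (d : PySem.Dict Int Int)
    (h : ∀ j, d.getD j 0 = 0) (k : Int) :
    (l.foldl (fun d e => d.insert e.1 (0 : Int)) d).getD k 0 = 0 := by
  induction l generalizing d with
  | nil => exact h k
  | cons e t ih =>
    simp only [List.foldl_cons]
    refine ih _ (fun j => ?_)
    rw [PySem.Dict.getD_insert]
    split <;> simp [h]

theorem pv_getD_count (l : List (Int × String × List String)) (d : PySem.Dict Int Int) (k : Int) :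
    (l.foldl (fun d e => d.insert e.1 (d.getD e.1 0 + 1)) d).getD k 0
      = d.getD k 0 + ((l.filter (fun e => e.1 == k)).map (fun _ => (1 : Int))).sum :=
  pv_getD_accum l (fun _ => 1) d k

theorem pv_getD_phase3 (pe : List (Int × String × List String)) (P : List String)
    (d : PySem.Dict Int Int) (k : Int) :
    (P.foldl (fun d p =>
        pe.foldl (fun d e => if e.2.2.contains p then d.insert e.1 (d.getD e.1 0 + 1) else d) d) d).getD k 0
      = d.getD k 0 + (P.map (fun p =>
          (((pe.filter (fun e => e.2.2.contains p)).filter (fun e => e.1 == k)).map (fun _ => (1 : Int))).sum)).sum := by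
  induction P generalizing d with
  | nil => simp
  | cons p ps ih =>
    simp only [List.foldl_cons, ih, List.map_cons, List.sum_cons]
    rw [← List.foldl_filter, pv_getD_count]
    ring

-- keys stay literally set(ids) through every phase
theorem pv_keys_init (l : List (Int × String × List String)) :
    (l.foldl (fun d e => d.insert e.1 (0 : Int)) PySem.Dict.empty).keys
      = PySem.Set.ofList (l.map (fun e => e.1)) := by
  rw [PySem.Dict.keys_foldl_insert_key l (fun e => e.1) (fun _ _ => 0)]
  rfl

theorem pv_keys_accum (l : List (Int × String × List String))
    (f : PySem.Dict Int Int → (Int × String × List String) → Int) (d : PySem.Dict Int Int)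
    (h : ∀ e ∈ l, e.1 ∈ d.keys) :
    (l.foldl (fun d e => d.insert e.1 (f d e)) d).keys = d.keys := by
  rw [PySem.Dict.keys_foldl_insert_key l (fun e => e.1) f]
  exact pv_set_update_self _ _ (by simpa using h)

theorem pv_keys_phase3 (pe : List (Int × String × List String)) (P : List String)
    (d : PySem.Dict Int Int) (h : ∀ e ∈ pe, e.1 ∈ d.keys) :
    (P.foldl (fun d p =>
        pe.foldl (fun d e => if e.2.2.contains p then d.insert e.1 (d.getD e.1 0 + 1) else d) d) d).keys
      = d.keys := by
  induction P generalizing d with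
  | nil => rfl
  | cons p ps ih =>
    simp only [List.foldl_cons]
    have hstep : (pe.foldl (fun d e => if e.2.2.contains p then d.insert e.1 (d.getD e.1 0 + 1) else d) d).keys = d.keys := by
      rw [← List.foldl_filter]
      exact pv_keys_accum _ _ _ (fun e he => h e (List.mem_of_mem_filter he))
    rw [ih _ (by rw [hstep]; exact h), hstep]

-- an indicator sum over a duplicate-free list
theorem pv_indicator_sum (S : List String) (p : String) (h : S.Nodup) :
    (S.map (fun t => if t == p then (1 : Int) else 0)).sum = if p ∈ S then 1 else 0 := by
  rw [PySem.List.sum_map_ite_one_zero,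
    show List.countP (fun t => t == p) S = S.count p from rfl]
  by_cases hp : p ∈ S
  · rw [List.count_eq_one_of_mem h hp]; simp [hp]
  · rw [List.count_eq_zero_of_not_mem hp]; simp [hp]

-- pref_count is Counter(preferences), so its lookups are counts
theorem pv_tagsum (P : List String) (tags : List String) :
    ((PySem.Set.ofList tags).map (fun t => ((P.count t : Int)))).sum
      = (P.map (fun p => if tags.contains p then (1 : Int) else 0)).sum := by
  induction P with
  | nil => simp
  | cons p ps ih =>
    simp only [List.map_cons, List.sum_cons]
    have hc : ∀ t : String, (((p :: ps).count t : Int)) = (ps.count t : Int) + (if t == p then (1 : Int) else 0) := by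
      intro t
      rw [List.count_cons]
      push_cast
      by_cases h : p = t
      · simp [h]
      · simp [h, Ne.symm h]
    calc ((PySem.Set.ofList tags).map (fun t => (((p :: ps).count t : Int)))).sum
        = ((PySem.Set.ofList tags).map (fun t => (ps.count t : Int) + (if t == p then (1 : Int) else 0))).sum :=
          congrArg List.sum (List.map_congr_left (fun t _ => hc t))
      _ = ((PySem.Set.ofList tags).map (fun t => (ps.count t : Int))).sum
            + ((PySem.Set.ofList tags).map (fun t => if t == p then (1 : Int) else 0)).sum := by
          rw [PySem.List.sum_map_add_int]
      _ = (if tags.contains p then (1 : Int) else 0) + (ps.map (fun q => if tags.contains q then (1 : Int) else 0)).sum := by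
          rw [ih, pv_indicator_sum _ _ (PySem.Set.nodup_ofList _)]
          by_cases hp : p ∈ tags
          · simp [PySem.Set.mem_ofList, hp]
            ring
          · simp [PySem.Set.mem_ofList, hp]

-- sums over preferences and over events commute
theorem pv_sum_swap (P : List String) (E : List (Int × String × List String))
    (h : String → (Int × String × List String) → Int) :
    (P.map (fun p => (E.map (fun e => h p e)).sum)).sum
      = (E.map (fun e => (P.map (fun p => h p e)).sum)).sum := by
  induction P with
  | nil => simp
  | cons p ps ih =>
    simp only [List.map_cons, List.sum_cons, ih, PySem.List.sum_map_add_int]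

-- a 0/1 filter-count as a sum of indicators
theorem pv_filter_ones (l : List (Int × String × List String)) (p : (Int × String × List String) → Bool) :
    ((l.filter p).map (fun _ => (1 : Int))).sum = (l.map (fun e => if p e then (1 : Int) else 0)).sum := by
  rw [PySem.List.sum_map_const_int, PySem.List.sum_map_ite_one_zero, List.countP_eq_length_filter]
  ring

theorem pv_filter_swap (l : List (Int × String × List String)) (p q : (Int × String × List String) → Bool) :
    (l.filter p).filter q = (l.filter q).filter p := by
  rw [List.filter_filter, List.filter_filter]
  exact List.filter_congr (fun a _ => Bool.and_comm _ _)

-- both scoring orders give the same per-id total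
theorem pv_value (pe : List (Int × String × List String)) (P : List String)
    (cp : (Int × String × List String) → Bool) (k : Int) :
    (((pe.filter cp).filter (fun e => e.1 == k)).map (fun _ => (1 : Int))).sum
      + (P.map (fun p =>
          (((pe.filter (fun e => e.2.2.contains p)).filter (fun e => e.1 == k)).map (fun _ => (1 : Int))).sum)).sum
    = ((pe.filter (fun e => e.1 == k)).map (fun e =>
        (if cp e then (1 : Int) else 0)
          + ((PySem.Set.ofList e.2.2).map (fun t => ((P.count t : Int)))).sum)).sum := by
  rw [PySem.List.sum_map_add_int]
  congr 1
  · rw [pv_filter_swap, pv_filter_ones]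
  · calc (P.map (fun p =>
          (((pe.filter (fun e => e.2.2.contains p)).filter (fun e => e.1 == k)).map (fun _ => (1 : Int))).sum)).sum
        = (P.map (fun p =>
            ((pe.filter (fun e => e.1 == k)).map (fun e => if e.2.2.contains p then (1 : Int) else 0)).sum)).sum := by
          exact congrArg List.sum (List.map_congr_left (fun p _ => by rw [pv_filter_swap, pv_filter_ones]))
      _ = ((pe.filter (fun e => e.1 == k)).map (fun e =>
            (P.map (fun p => if e.2.2.contains p then (1 : Int) else 0)).sum)).sum :=
          pv_sum_swap P _ _
      _ = ((pe.filter (fun e => e.1 == k)).map (fun e =>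
            ((PySem.Set.ofList e.2.2).map (fun t => ((P.count t : Int)))).sum)).sum :=
          congrArg List.sum (List.map_congr_left (fun e _ => (pv_tagsum P e.2.2).symm))

-- A's three dict phases and B's single accumulation pass build the same items list
theorem pv_items_eq (pe : List (Int × String × List String)) (P : List String)
    (cp : (Int × String × List String) → Bool) :
    (P.foldl (fun d p =>
        pe.foldl (fun d e => if e.2.2.contains p then d.insert e.1 (d.getD e.1 0 + 1) else d) d)
      ((pe.filter cp).foldl (fun d c => d.insert c.1 (d.getD c.1 0 + 1))
        (pe.foldl (fun d event => d.insert event.1 (0 : Int)) PySem.Dict.empty))).items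
    = (pe.foldl (fun d e => d.insert e.1 (d.getD e.1 0
          + ((if cp e then (1 : Int) else 0)
            + ((PySem.Set.ofList e.2.2).map (fun t => (PySem.Dict.counter P).getD t 0)).sum)))
        PySem.Dict.empty).items := by
  have hk1 : (pe.foldl (fun d event => d.insert event.1 (0 : Int)) PySem.Dict.empty).keys
      = PySem.Set.ofList (pe.map (fun e => e.1)) := pv_keys_init pe
  have hk2 : ((pe.filter cp).foldl (fun d c => d.insert c.1 (d.getD c.1 0 + 1))
        (pe.foldl (fun d event => d.insert event.1 (0 : Int)) PySem.Dict.empty)).keys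
      = PySem.Set.ofList (pe.map (fun e => e.1)) := by
    rw [pv_keys_accum _ _ _ (fun e he => ?_), hk1]
    rw [hk1]
    exact (PySem.Set.mem_ofList _ _).2 (List.mem_map_of_mem (List.mem_of_mem_filter he))
  have hk3 : (P.foldl (fun d p =>
        pe.foldl (fun d e => if e.2.2.contains p then d.insert e.1 (d.getD e.1 0 + 1) else d) d)
      ((pe.filter cp).foldl (fun d c => d.insert c.1 (d.getD c.1 0 + 1))
        (pe.foldl (fun d event => d.insert event.1 (0 : Int)) PySem.Dict.empty))).keys
      = PySem.Set.ofList (pe.map (fun e => e.1)) := by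
    rw [pv_keys_phase3 _ _ _ (fun e he => ?_), hk2]
    rw [hk2]
    exact (PySem.Set.mem_ofList _ _).2 (List.mem_map_of_mem he)
  have hkB : (pe.foldl (fun d e => d.insert e.1 (d.getD e.1 0
          + ((if cp e then (1 : Int) else 0)
            + ((PySem.Set.ofList e.2.2).map (fun t => (PySem.Dict.counter P).getD t 0)).sum)))
        PySem.Dict.empty).keys
      = PySem.Set.ofList (pe.map (fun e => e.1)) := by
    rw [PySem.Dict.keys_foldl_insert_key pe (fun e => e.1)]
    rfl
  have hv : ∀ k : Int,
      (P.foldl (fun d p =>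
          pe.foldl (fun d e => if e.2.2.contains p then d.insert e.1 (d.getD e.1 0 + 1) else d) d)
        ((pe.filter cp).foldl (fun d c => d.insert c.1 (d.getD c.1 0 + 1))
          (pe.foldl (fun d event => d.insert event.1 (0 : Int)) PySem.Dict.empty))).getD k 0
      = (pe.foldl (fun d e => d.insert e.1 (d.getD e.1 0
            + ((if cp e then (1 : Int) else 0)
              + ((PySem.Set.ofList e.2.2).map (fun t => (PySem.Dict.counter P).getD t 0)).sum)))
          PySem.Dict.empty).getD k 0 := by
    intro k
    rw [pv_getD_phase3, pv_getD_count,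
      pv_getD_init pe PySem.Dict.empty (fun j => by simp),
      pv_getD_accum pe (fun e => (if cp e then (1 : Int) else 0)
        + ((PySem.Set.ofList e.2.2).map (fun t => (PySem.Dict.counter P).getD t 0)).sum)]
    simp only [PySem.Dict.getD_counter, PySem.Dict.getD_empty, zero_add]
    exact pv_value pe P cp k
  rw [PySem.Dict.items_eq_map_keys _ (by rw [hk3]; exact PySem.Set.nodup_ofList _) 0,
    PySem.Dict.items_eq_map_keys _ (by rw [hkB]; exact PySem.Set.nodup_ofList _) 0,
    hk3, hkB]
  exact List.map_congr_left (fun k _ => by rw [hv k])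

theorem create_event_ranking_spec : Claim_equal_create_event_ranking := by
  intro booked_events preferences event_details max_limit _hdom
  unfold Spec_create_event_ranking create_event_ranking create_event_ranking_alt
  simp only [pv_ofList_contains, PySem.Dict.foldl_insert_getD_add_one_eq_counter]
  rw [pv_items_eq]
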